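-- pv_equiv track=rewrite | github.com/tomdom35/HackerRank | Happy Ladybugs/Happy Ladybugs.py | count_bugs
-- ===== SOURCE A (Python) =====
-- def count_bugs(b):
--     bug_type = []
--     bug_count = []
--     for i in b:
--         if i in bug_type:
--             index = bug_type.index(i)
--             bug_count[index] += 1
--         elif i != '_':
--             bug_type.append(i)
--             bug_count.append(1)
--     for i in bug_count:
--         if i == 1:
--             return 'NO'
--     return 'YES'
-- ===== SOURCE B (Python) =====
-- def count_bugs(b):
--     # sort the non-'_' characters, then one run-length pass over the sorted
--     # sequence: a run of length 1 means a lonely ladybug.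
--     s = sorted(c for c in b if c != '_')
--     i, n = 0, len(s)
--     while i < n:
--         j = i + 1
--         while j < n and s[j] == s[i]:
--             j += 1
--         if j - i == 1:
--             return 'NO'
--         i = j
--     return 'YES'
-- ===== Notes on version B (the rewrite author's own statement) =====
-- stated objective: alternative
-- what changed: Replaces the parallel type/count lists maintained with list.index during one scan by sort-then-run-length: sort the non-underscore characters once and scan adjacent equal runs for a run of length 1.
import Mathlib
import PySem

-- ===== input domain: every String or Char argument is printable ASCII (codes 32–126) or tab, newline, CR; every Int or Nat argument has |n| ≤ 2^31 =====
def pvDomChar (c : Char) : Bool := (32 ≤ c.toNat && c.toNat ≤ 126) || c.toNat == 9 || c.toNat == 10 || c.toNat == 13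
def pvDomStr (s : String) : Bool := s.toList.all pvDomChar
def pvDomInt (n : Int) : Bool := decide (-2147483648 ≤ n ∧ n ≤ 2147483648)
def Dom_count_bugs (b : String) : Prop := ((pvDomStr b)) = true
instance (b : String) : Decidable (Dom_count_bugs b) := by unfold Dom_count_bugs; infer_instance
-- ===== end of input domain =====

-- B replaces A's single-pass parallel type/count lists (maintained with list.index) by sort-then-run-length:
-- sort the non-'_' characters once and scan adjacent equal runs for a run of length 1 (alternative algorithm, same results).


-- ===== PORT A =====
-- first loop of A: maintain the parallel lists bug_type / bug_count
def bugStep (acc : List Char × List Int) (i : Char) : List Char × List Int :=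
  if i ∈ acc.1 then
    match PySem.List.index? acc.1 i with
    | some idx => (acc.1, acc.2.set idx (acc.2.getD idx 0 + 1))
    | none => acc
  else if i ≠ '_' then (acc.1 ++ [i], acc.2 ++ [1])
  else acc

-- second loop of A with its early return
def checkOnes : List Int → String
  | [] => "YES"
  | i :: rest => if i == 1 then "NO" else checkOnes rest

def count_bugs (b : String) : String :=
  checkOnes (b.toList.foldl bugStep ([], [])).2

-- ===== PORT B =====
-- run-length scan over the sorted list: true iff some maximal run of equal characters has length 1
def scanRuns : List Char → Bool
  | [] => false
  | c :: rest =>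
    if (rest.takeWhile (· == c)).length == 0 then true
    else scanRuns (rest.dropWhile (· == c))
termination_by l => l.length
decreasing_by simpa using Nat.lt_succ_of_le (List.length_dropWhile_le (· == c) rest)

def count_bugs_alt (b : String) : String :=
  let s := PySem.List.sorted (b.toList.filter (fun c => c ≠ '_')) (fun x => x) false
  if scanRuns s then "NO" else "YES"

-- ===== PRECONDITION & SPEC =====
def Spec_count_bugs (b : String) (out : String) : Prop := out = count_bugs_alt b
instance (b : String) (out : String) : Decidable (Spec_count_bugs b out) := by unfold Spec_count_bugs; infer_instance

-- ===== CLAIM (what is proved, stated in full; the proofs are below) =====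
def Claim_equal_count_bugs : Prop := ∀ (b : String), Dom_count_bugs b → Spec_count_bugs b (count_bugs b)

-- ===== LEMMAS AND PROOFS =====

-- the shared characterisation: some non-'_' character occurs exactly once
def lonely (l : List Char) : Bool := l.any (fun c => c != '_' && l.count c == 1)

-- ---- B side ----
theorem not_mem_dropWhile_beq (c : Char) (rest : List Char)
    (hp : (c :: rest).Pairwise (· ≤ ·)) : c ∉ rest.dropWhile (· == c) := by
  intro hmem
  have hcle : ∀ x ∈ rest, c ≤ x := (List.pairwise_cons.mp hp).1
  have hdp : (rest.dropWhile (· == c)).Pairwise (· ≤ ·) :=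
    List.Pairwise.sublist (List.dropWhile_sublist _) (List.pairwise_cons.mp hp).2
  cases hd : rest.dropWhile (· == c) with
  | nil => rw [hd] at hmem; simp at hmem
  | cons h t =>
    have hne : rest.dropWhile (· == c) ≠ [] := by rw [hd]; simp
    have hhd := List.head_dropWhile_not (· == c) hne
    simp only [hd, List.head_cons] at hhd
    rw [hd] at hmem hdp
    simp at hhd
    rcases List.mem_cons.mp hmem with h1 | h1
    · exact hhd h1.symm
    · have hhc : h ≤ c := (List.pairwise_cons.mp hdp).1 c h1
      have hmr : h ∈ rest := (List.dropWhile_sublist (· == c)).mem (hd ▸ List.mem_cons_self ..)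
      exact hhd (le_antisymm hhc (hcle h hmr))

theorem scan_iff : ∀ (l : List Char), l.Pairwise (· ≤ ·) →
    (scanRuns l = true ↔ ∃ c ∈ l, l.count c = 1) := by
  intro l
  induction l using scanRuns.induct with
  | case1 => simp [scanRuns]
  | case2 c rest h =>
    intro hp
    have ht : rest.takeWhile (· == c) = [] := by
      simpa using h
    have hrd : rest = rest.dropWhile (· == c) := by
      conv_lhs => rw [← List.takeWhile_append_dropWhile (p := (· == c)) (l := rest)]
      rw [ht]; simp
    have hcr : c ∉ rest := fun hm => not_mem_dropWhile_beq c rest hp (hrd ▸ hm)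
    simp only [scanRuns, h, if_pos]
    constructor
    · intro _
      exact ⟨c, List.mem_cons_self .., by
        simp [List.count_cons_self, List.count_eq_zero.mpr hcr]⟩
    · intro _; trivial
  | case3 c rest h ih =>
    intro hp
    have hne : rest.takeWhile (· == c) ≠ [] := by
      intro hnil; simp [hnil] at h
    have htc : ∀ x ∈ rest.takeWhile (· == c), x = c := by
      intro x hx
      have := List.mem_takeWhile_imp hx
      simpa using this
    have hcd : c ∉ rest.dropWhile (· == c) := not_mem_dropWhile_beq c rest hp
    have hdp : (rest.dropWhile (· == c)).Pairwise (· ≤ ·) :=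
      List.Pairwise.sublist (List.dropWhile_sublist _) (List.pairwise_cons.mp hp).2
    have hrest : rest.takeWhile (· == c) ++ rest.dropWhile (· == c) = rest :=
      List.takeWhile_append_dropWhile
    set t := rest.takeWhile (· == c) with htdef
    set d := rest.dropWhile (· == c) with hddef
    have hcount_c : (c :: rest).count c = t.length + 1 := by
      rw [List.count_cons_self, ← hrest, List.count_append,
        List.count_eq_length.mpr (fun b hb => by simp [htc b hb]),
        List.count_eq_zero.mpr hcd]
    have hcount_ne : ∀ x, x ≠ c → (c :: rest).count x = d.count x := by
      intro x hx
      rw [List.count_cons_of_ne (Ne.symm hx), ← hrest, List.count_append,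
        List.count_eq_zero.mpr (fun hm => hx (htc x hm)), Nat.zero_add]
    have hmem_d : ∀ x, x ≠ c → x ∈ c :: rest → x ∈ d := by
      intro x hx hm
      rcases List.mem_cons.mp hm with h1 | h1
      · exact absurd h1 hx
      · rw [← hrest] at h1
        rcases List.mem_append.mp h1 with h2 | h2
        · exact absurd (htc x h2) hx
        · exact h2
    rw [scanRuns, ← htdef, ← hddef, if_neg h, ih hdp]
    constructor
    · rintro ⟨x, hxd, hxc⟩
      have hxne : x ≠ c := fun he => hcd (he ▸ hxd)
      refine ⟨x, List.mem_cons_of_mem _ (by rw [← hrest]; exact List.mem_append_right _ hxd), ?_⟩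
      rw [hcount_ne x hxne]; exact hxc
    · rintro ⟨x, hxm, hxc⟩
      rcases eq_or_ne x c with rfl | hxne
      · rw [hcount_c] at hxc
        have hlen : t.length ≠ 0 := by
          simpa [List.length_eq_zero_iff] using hne
        omega
      · exact ⟨x, hmem_d x hxne hxm, by rw [← hcount_ne x hxne]; exact hxc⟩

theorem count_bugs_alt_eq (b : String) :
    count_bugs_alt b = if lonely b.toList = true then "NO" else "YES" := by
  unfold count_bugs_alt
  have hpair : (PySem.List.sorted (b.toList.filter (fun c => c ≠ '_')) (fun x => x) false).Pairwise (· ≤ ·) :=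
    PySem.List.sorted_pairwise _ _
  have hperm : (PySem.List.sorted (b.toList.filter (fun c => c ≠ '_')) (fun x => x) false).Perm
      (b.toList.filter (fun c => c ≠ '_')) := PySem.List.sorted_perm _ _ _
  have hkey : scanRuns (PySem.List.sorted (b.toList.filter (fun c => c ≠ '_')) (fun x => x) false)
      = lonely b.toList := by
    apply Bool.coe_iff_coe.mp
    rw [scan_iff _ hpair]
    constructor
    · rintro ⟨c, hc, hcount⟩
      have hcf : c ∈ b.toList.filter (fun c => c ≠ '_') := hperm.mem_iff.mp hc
      have hcl : c ∈ b.toList ∧ c ≠ '_' := by simpa using List.mem_filter.mp hcf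
      have hcnt : b.toList.count c = 1 := by
        rw [← List.count_filter (p := fun c => decide ¬ c = '_') (by simpa using hcl.2),
          ← hperm.count_eq]
        exact hcount
      simp only [lonely, List.any_eq_true]
      exact ⟨c, hcl.1, by simp [hcl.2, hcnt]⟩
    · intro hl
      simp only [lonely, List.any_eq_true] at hl
      obtain ⟨c, hc, hprop⟩ := hl
      rw [Bool.and_eq_true] at hprop
      have hne : c ≠ '_' := by simpa using hprop.1
      have hcnt : b.toList.count c = 1 := by simpa using hprop.2
      refine ⟨c, hperm.mem_iff.mpr (List.mem_filter.mpr ⟨hc, by simpa using hne⟩), ?_⟩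
      rw [hperm.count_eq]
      rw [List.count_filter (by simpa using hne)]
      exact hcnt
  show (if scanRuns (PySem.List.sorted (b.toList.filter (fun c => c ≠ '_')) (fun x => x) false) = true
      then "NO" else "YES") = _
  rw [hkey]

-- ---- A side ----
def BugInv (p : List Char) (st : List Char × List Int) : Prop :=
  st.1.Nodup ∧ (∀ c, c ∈ st.1 ↔ c ∈ p ∧ c ≠ '_') ∧
    st.2 = st.1.map (fun c => (p.count c : Int))

theorem set_map_count : ∀ (bt : List Char) (k : Nat) (f : Char → Int) (i : Char),
    bt.Nodup → PySem.List.index? bt i = some k →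
    (bt.map f).set k ((bt.map f).getD k 0 + 1) = bt.map (fun c => if c = i then f c + 1 else f c) := by
  intro bt
  induction bt with
  | nil => intro k f i _ h; simp [PySem.List.index?_eq_idxOf?] at h
  | cons x xs ih =>
    intro k f i hnd hidx
    by_cases hx : x = i
    · subst hx
      rw [PySem.List.index?_cons_self] at hidx
      obtain rfl : k = 0 := by injection hidx with h; omega
      have hxs : x ∉ xs := (List.nodup_cons.mp hnd).1
      simp only [List.map_cons, List.set_cons_zero, List.getD_cons_zero]
      congr 1
      apply List.map_congr_left
      intro a ha
      rw [if_neg (show ¬ a = x from fun he => hxs (he ▸ ha))]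
    · rw [PySem.List.index?_cons_of_ne xs hx] at hidx
      cases hxs : PySem.List.index? xs i with
      | none => rw [hxs] at hidx; simp at hidx
      | some k' =>
        rw [hxs] at hidx
        simp only [Option.map_some] at hidx
        obtain rfl : k = k' + 1 := by injection hidx with h; omega
        simp only [List.map_cons, List.set_cons_succ, List.getD_cons_succ, if_neg hx]
        congr 1
        exact ih k' f i (List.nodup_cons.mp hnd).2 hxs

theorem inv_step (p : List Char) (st : List Char × List Int) (i : Char)
    (h : BugInv p st) : BugInv (p ++ [i]) (bugStep st i) := by
  obtain ⟨hnd, hmem, hbc⟩ := h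
  unfold bugStep
  by_cases hi : i ∈ st.1
  · rw [if_pos hi]
    obtain ⟨k, hk⟩ : ∃ k, PySem.List.index? st.1 i = some k :=
      Option.isSome_iff_exists.mp ((PySem.List.index?_isSome_iff _ _).mpr hi)
    simp only [hk]
    refine ⟨hnd, ?_, ?_⟩
    · intro c
      rw [hmem c]
      constructor
      · rintro ⟨hcp, hcu⟩; exact ⟨List.mem_append_left _ hcp, hcu⟩
      · rintro ⟨hcp, hcu⟩
        rcases List.mem_append.mp hcp with h1 | h1
        · exact ⟨h1, hcu⟩
        · have : c = i := by simpa using h1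
          subst this
          exact ⟨((hmem c).mp hi).1, hcu⟩
    · rw [hbc, set_map_count st.1 k _ i hnd hk]
      apply List.map_congr_left
      intro a _
      rw [List.count_append]
      by_cases hai : a = i
      · subst hai; simp
      · simp [hai, Ne.symm hai]
  · rw [if_neg hi]
    by_cases hu : i ≠ '_'
    · rw [if_pos hu]
      have hip : i ∉ p := fun hp' => hi ((hmem i).mpr ⟨hp', hu⟩)
      refine ⟨?_, ?_, ?_⟩
      · simp [List.nodup_append, hnd]
        exact fun a ha he => hi (he ▸ ha)
      · intro c
        simp only [List.mem_append, List.mem_singleton, hmem c]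
        constructor
        · rintro ((⟨h1, h2⟩) | rfl)
          · exact ⟨Or.inl h1, h2⟩
          · exact ⟨Or.inr rfl, hu⟩
        · rintro ⟨h1 | rfl, h2⟩
          · exact Or.inl ⟨h1, h2⟩
          · exact Or.inr rfl
      · simp only [List.map_append, hbc]
        congr 1
        · apply List.map_congr_left
          intro a ha
          have hai : a ≠ i := fun he => hi (he ▸ ha)
          rw [List.count_append]
          simp [Ne.symm hai]
        · simp [List.count_append, List.count_eq_zero.mpr hip]
    · rw [if_neg hu]
      have hu' : i = '_' := not_not.mp hu
      subst hu'
      refine ⟨hnd, ?_, ?_⟩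
      · intro c
        rw [hmem c]
        constructor
        · rintro ⟨h1, h2⟩; exact ⟨List.mem_append_left _ h1, h2⟩
        · rintro ⟨h1, h2⟩
          rcases List.mem_append.mp h1 with h3 | h3
          · exact ⟨h3, h2⟩
          · exact absurd (by simpa using h3) h2
      · rw [hbc]
        apply List.map_congr_left
        intro a ha
        have ha' : a ≠ '_' := ((hmem a).mp ha).2
        rw [List.count_append]
        simp [Ne.symm ha']

theorem inv_fold : ∀ (l p : List Char) (st : List Char × List Int),
    BugInv p st → BugInv (p ++ l) (l.foldl bugStep st) := by
  intro l
  induction l with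
  | nil => intro p st h; simpa using h
  | cons i l ih =>
    intro p st h
    rw [List.foldl_cons]
    have := ih (p ++ [i]) _ (inv_step p st i h)
    simpa [List.append_assoc] using this

theorem checkOnes_eq : ∀ bc : List Int, checkOnes bc = if bc.any (· == 1) then "NO" else "YES" := by
  intro bc
  induction bc with
  | nil => simp [checkOnes]
  | cons i rest ih => by_cases h : i = 1 <;> simp [checkOnes, h, ih]

theorem count_bugs_eq (b : String) :
    count_bugs b = if lonely b.toList = true then "NO" else "YES" := by
  have hinv : BugInv b.toList (b.toList.foldl bugStep ([], [])) := by
    have := inv_fold b.toList [] ([], []) ⟨by simp, by simp, by simp⟩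
    simpa using this
  obtain ⟨hnd, hmem, hbc⟩ := hinv
  unfold count_bugs
  rw [checkOnes_eq, hbc]
  have hb : ((b.toList.foldl bugStep ([], [])).1.map (fun c => (b.toList.count c : Int))).any (· == 1)
      = lonely b.toList := by
    apply Bool.coe_iff_coe.mp
    simp only [List.any_map, List.any_eq_true, Function.comp, lonely]
    constructor
    · rintro ⟨c, hc, hone⟩
      obtain ⟨hcl, hcu⟩ := (hmem c).mp hc
      refine ⟨c, hcl, ?_⟩
      have : b.toList.count c = 1 := by exact_mod_cast (by simpa using hone : ((b.toList.count c : Int) = 1))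
      simp [hcu, this]
    · rintro ⟨c, hc, hprop⟩
      rw [Bool.and_eq_true] at hprop
      have hcu : c ≠ '_' := by simpa using hprop.1
      have hcnt : b.toList.count c = 1 := by simpa using hprop.2
      refine ⟨c, (hmem c).mpr ⟨hc, hcu⟩, by simp [hcnt]⟩
  rw [hb]

-- ===== VERDICT (by name: the statement is the Claim_ definition above) =====
theorem count_bugs_spec : Claim_equal_count_bugs := by
  intro b _
  unfold Spec_count_bugs
  rw [count_bugs_eq, count_bugs_alt_eq]
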